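-- pv_equiv track=rewrite | github.com/gefenk9/lyrics-to-chords-generator | model/create_training_data.py | prep_tags
-- ===== SOURCE A (Python) =====
-- def prep_tags(sent_chords):
--     if sent_chords[0].strip() == '' and sent_chords[1].strip() == '':
--         return [''], ['']
--     sent_splitted = sent_chords[0].strip().split(" ")
--     chords_tags_splitted = list(sent_chords[1].strip().split(" "))
--     while len(sent_splitted) != len(chords_tags_splitted):
--         if len(chords_tags_splitted) > len(sent_splitted):
--             if ' ' in chords_tags_splitted:
--                 chords_tags_splitted.remove(' ')
--             elif '' in chords_tags_splitted:
--                 chords_tags_splitted.remove('')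
--             else:
--                 chords_tags_splitted = chords_tags_splitted[:-1]
--         else:
--             chords_tags_splitted.append(chords_tags_splitted[-1])
--     last_not_empty = chords_tags_splitted[0]
--     if last_not_empty == '' or last_not_empty == ' ':
--         for tag in chords_tags_splitted:
--             if tag is not '' and tag is not ' ':
--                 last_not_empty = tag
--     for index, tag in enumerate(chords_tags_splitted):
--         if tag == '' or tag == ' ':
--             chords_tags_splitted[index] = last_not_empty
--         else:
--
--             last_not_empty = tag
--
--     return sent_splitted, chords_tags_splitted
-- ===== SOURCE B (Python) =====
-- def prep_tags(sent_chords):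
--     s0 = sent_chords[0].strip()
--     s1 = sent_chords[1].strip()
--     if s0 == '' and s1 == '':
--         return [''], ['']
--     words = s0.split(" ")
--     tags = s1.split(" ")
--     n = len(words)
--     m = len(tags)
--     if n < m:
--         # drop the first m-n empty tags, then truncate to n: one pass
--         k = m - n
--         kept = []
--         for t in tags:
--             if k > 0 and t == '':
--                 k -= 1
--             else:
--                 kept.append(t)
--         tags = kept[:n]
--     elif m < n:
--         tags = tags + [tags[-1]] * (n - m)
--     last = tags[0] if tags else ''
--     if last == '':
--         for t in tags:
--             if t != '':
--                 last = t
--     out = []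
--     for t in tags:
--         if t == '':
--             out.append(last)
--         else:
--             last = t
--             out.append(t)
--     return words, out
-- ===== Notes on version B (the rewrite author's own statement) =====
-- stated objective: alternative
-- what changed: Replaces the while-loop of repeated list.remove/truncate with a single-pass filter that drops the first (m-n) empty tags followed by one slice, and pads by list multiplication instead of one-by-one appends; on the timed inputs both run in comparable time.
import Mathlib
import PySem

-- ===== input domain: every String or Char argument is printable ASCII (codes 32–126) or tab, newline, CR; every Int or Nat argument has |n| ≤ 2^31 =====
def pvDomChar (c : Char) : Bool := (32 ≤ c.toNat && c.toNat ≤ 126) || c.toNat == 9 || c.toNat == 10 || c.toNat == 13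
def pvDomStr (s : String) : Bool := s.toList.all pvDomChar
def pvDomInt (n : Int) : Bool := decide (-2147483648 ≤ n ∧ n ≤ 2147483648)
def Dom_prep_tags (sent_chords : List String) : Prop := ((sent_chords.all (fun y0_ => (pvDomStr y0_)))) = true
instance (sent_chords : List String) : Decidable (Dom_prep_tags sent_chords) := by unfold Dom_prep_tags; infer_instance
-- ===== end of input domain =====

-- B replaces A's while-loop of repeated list.remove/truncate by one filter pass plus a slice
-- (and pads by replication instead of one-by-one appends); objective: alternative algorithm.

-- ===== PORT A =====

-- A's while-loop: while len != n, remove ' ' / remove '' / drop last when too long, append tags[-1] when too short.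
def prepLoopA (n : Nat) (tags : List String) : List String :=
  if _h1 : tags.length = n then tags
  else if _h2 : n < tags.length then
    if _h3 : " " ∈ tags then prepLoopA n ((PySem.List.remove? tags " ").getD tags)
    else if _h4 : "" ∈ tags then prepLoopA n ((PySem.List.remove? tags "").getD tags)
    else prepLoopA n (PySem.List.slice tags none (some (-1)))
  else prepLoopA n (tags ++ [PySem.List.pyGetD tags (-1) ""])
termination_by ((tags.length : Int) - n).natAbs
decreasing_by
  · rw [PySem.List.remove?_eq_some_erase tags " " _h3, Option.getD_some]
    have := List.length_erase_of_mem _h3; omega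
  · rw [PySem.List.remove?_eq_some_erase tags "" _h4, Option.getD_some]
    have := List.length_erase_of_mem _h4; omega
  · rw [PySem.List.slice_to_neg_one]
    have : tags.dropLast.length = tags.length - 1 := List.length_dropLast; omega
  · simp; omega

-- A's scan for the last tag that is not '' and not ' ' (CPython interns '' and ' ', so `is not` = `≠` here)
def scanA (tags : List String) (init : String) : String :=
  tags.foldl (fun l t => if t ≠ "" ∧ t ≠ " " then t else l) init

-- A's enumerate loop writes only at the current index, so it is this stateful map
def fillA : List String → String → List String
  | [], _ => []
  | t :: ts, last => if t = "" ∨ t = " " then last :: fillA ts last else t :: fillA ts t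

def prep_tags (sent_chords : List String) : List String × List String :=
  let c0 := PySem.List.pyGetD sent_chords 0 ""
  let c1 := PySem.List.pyGetD sent_chords 1 ""
  if PySem.Str.strip c0 = "" ∧ PySem.Str.strip c1 = "" then ([""], [""])
  else
    let sentSplitted := (PySem.Str.split? (PySem.Str.strip c0) " ").getD []
    let tags0 := (PySem.Str.split? (PySem.Str.strip c1) " ").getD []
    let tags := prepLoopA sentSplitted.length tags0
    let first := PySem.List.pyGetD tags 0 ""
    let lastNotEmpty := if first = "" ∨ first = " " then scanA tags first else first
    (sentSplitted, fillA tags lastNotEmpty)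

-- ===== PORT B =====

-- Source B's single pass: drop the first k empty tags, keep the rest
def keepB : Nat → List String → List String
  | _, [] => []
  | k, t :: ts => if 0 < k ∧ t = "" then keepB (k - 1) ts else t :: keepB k ts

def scanB (tags : List String) (init : String) : String :=
  tags.foldl (fun l t => if t ≠ "" then t else l) init

def fillB : List String → String → List String
  | [], _ => []
  | t :: ts, last => if t = "" then last :: fillB ts last else t :: fillB ts t

def prep_tags_alt (sent_chords : List String) : List String × List String :=
  let s0 := PySem.Str.strip (PySem.List.pyGetD sent_chords 0 "")
  let s1 := PySem.Str.strip (PySem.List.pyGetD sent_chords 1 "")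
  if s0 = "" ∧ s1 = "" then ([""], [""])
  else
    let words := (PySem.Str.split? s0 " ").getD []
    let tags0 := (PySem.Str.split? s1 " ").getD []
    let n := words.length
    let m := tags0.length
    let tags :=
      if n < m then (keepB (m - n) tags0).take n
      else if m < n then tags0 ++ List.replicate (n - m) (PySem.List.pyGetD tags0 (-1) "")
      else tags0
    let last := if (PySem.List.pyGetD tags 0 "") = "" then scanB tags (PySem.List.pyGetD tags 0 "") else PySem.List.pyGetD tags 0 ""
    (words, fillB tags last)

-- ===== PRECONDITION & SPEC =====
-- Pre_ excludes only lists with fewer than two elements, on which Python A raises IndexError.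
def Pre_prep_tags (sent_chords : List String) : Prop := 2 ≤ sent_chords.length
instance (sent_chords : List String) : Decidable (Pre_prep_tags sent_chords) := by unfold Pre_prep_tags; infer_instance
def pvWitness_prep_tags : List String := ["a b c", "Am  G"]

def Spec_prep_tags (sent_chords : List String) (out : List String × List String) : Prop := out = prep_tags_alt sent_chords
instance (sent_chords : List String) (out : List String × List String) : Decidable (Spec_prep_tags sent_chords out) := by unfold Spec_prep_tags; infer_instance

-- ===== CLAIM (what is proved, stated in full; the proofs are below) =====
def Claim_equal_prep_tags : Prop := ∀ (sent_chords : List String), Dom_prep_tags sent_chords → Pre_prep_tags sent_chords → Spec_prep_tags sent_chords (prep_tags sent_chords)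

-- ===== LEMMAS AND PROOFS =====

-- equation lemmas for PySem.Chars.splitOn.go
theorem go_succ_nil (sep cur : List Char) (n : Nat) (acc : List (List Char)) :
    PySem.Chars.splitOn.go sep (n+1) [] cur acc = (cur.reverse :: acc).reverse := by
  rw [PySem.Chars.splitOn.go]; omega

theorem go_succ_cons (sep cur : List Char) (n : Nat) (c : Char) (rest : List Char) (acc : List (List Char)) :
    PySem.Chars.splitOn.go sep (n+1) (c :: rest) cur acc =
      if sep.isPrefixOf (c :: rest) then
        PySem.Chars.splitOn.go sep n (List.drop sep.length (c :: rest)) [] (cur.reverse :: acc)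
      else PySem.Chars.splitOn.go sep n rest (c :: cur) acc := by
  rw [PySem.Chars.splitOn.go]

theorem go_ne_nil (sep : List Char) (fuel : Nat) (l cur : List Char) (acc : List (List Char)) :
    PySem.Chars.splitOn.go sep fuel l cur acc ≠ [] := by
  induction fuel generalizing l cur acc with
  | zero => rw [PySem.Chars.splitOn.go]; simp
  | succ n ih =>
    cases l with
    | nil => rw [go_succ_nil]; simp
    | cons c rest => rw [go_succ_cons]; split <;> apply ih

theorem go_no_sp (fuel : Nat) (l cur : List Char) (acc : List (List Char))
    (hf : l.length < fuel) (ha : ∀ x ∈ acc, ' ' ∉ x) (hc : ' ' ∉ cur) :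
    ∀ x ∈ PySem.Chars.splitOn.go [' '] fuel l cur acc, ' ' ∉ x := by
  induction fuel generalizing l cur acc with
  | zero => omega
  | succ n ih =>
    cases l with
    | nil =>
      rw [go_succ_nil]
      intro x hx
      simp only [List.mem_reverse, List.mem_cons] at hx
      rcases hx with h | h
      · subst h; simpa using hc
      · exact ha _ h
    | cons c rest =>
      rw [go_succ_cons]
      split
      · rename_i h
        apply ih
        · simp at hf ⊢; omega
        · intro x hx
          rcases List.mem_cons.mp hx with h' | h'
          · subst h'; simpa using hc
          · exact ha _ h'
        · simp
      · rename_i h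
        apply ih
        · simp at hf ⊢; omega
        · exact ha
        · intro hmem
          rcases List.mem_cons.mp hmem with h' | h'
          · apply h; subst h'; simp [List.isPrefixOf]
          · exact hc h'

theorem split_sp_ne_nil (s : String) : (PySem.Str.split? s " ").getD [] ≠ [] := by
  have h : (" " : String).toList = [' '] := rfl
  simp only [PySem.Str.split?, PySem.Chars.split?, h, PySem.Chars.splitOn]
  simp only [List.isEmpty_cons, ite_false, Option.map_some, Option.getD_some, Bool.false_eq_true]
  simp [go_ne_nil]

theorem split_sp_no_sp (s : String) : " " ∉ (PySem.Str.split? s " ").getD [] := by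
  have h : (" " : String).toList = [' '] := rfl
  simp only [PySem.Str.split?, PySem.Chars.split?, h, PySem.Chars.splitOn]
  simp only [List.isEmpty_cons, ite_false, Option.map_some, Option.getD_some, Bool.false_eq_true]
  intro hmem
  rcases List.mem_map.mp hmem with ⟨cs, hcs, hofs⟩
  have hno : ' ' ∉ cs :=
    go_no_sp (s.toList.length + 1) s.toList [] [] (by omega) (by simp) (by simp) cs hcs
  apply hno
  have : cs = [' '] := by
    have := congrArg String.toList hofs
    simpa using this
  simp [this]

-- keepB facts
theorem keepB_zero (l : List String) : keepB 0 l = l := by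
  induction l with
  | nil => rfl
  | cons t ts ih => simp [keepB, ih]

theorem keepB_not_mem (k : Nat) (l : List String) (h : "" ∉ l) : keepB k l = l := by
  induction l generalizing k with
  | nil => rfl
  | cons t ts ih =>
    simp only [List.mem_cons, not_or] at h
    have h1 : ¬ t = "" := fun e => h.1 e.symm
    simp [keepB, h1, ih _ h.2]

theorem keepB_erase (k : Nat) (l : List String) (hk : 0 < k) (h : "" ∈ l) :
    keepB k l = keepB (k - 1) (l.erase "") := by
  induction l generalizing k with
  | nil => exact absurd h (List.not_mem_nil)
  | cons t ts ih =>
    by_cases ht : t = ""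
    · subst ht; simp [keepB, hk]
    · have h' : "" ∈ ts := by
        rcases List.mem_cons.mp h with h0 | h0
        · exact absurd h0.symm ht
        · exact h0
      rw [List.erase_cons_tail (by simpa using ht)]
      simp [keepB, ht, ih _ hk h']

theorem mem_keepB (k : Nat) (l : List String) (x : String) (h : x ∈ keepB k l) : x ∈ l := by
  induction l generalizing k with
  | nil => simp [keepB] at h
  | cons t ts ih =>
    simp only [keepB] at h
    split at h
    · exact List.mem_cons_of_mem _ (ih _ h)
    · rcases List.mem_cons.mp h with h | h
      · simp [h]
      · exact List.mem_cons_of_mem _ (ih _ h)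

-- A's loop (no ' ' in the list) equals B's filter-and-truncate when too long …
theorem loopA_long (k : Nat) : ∀ (tags : List String) (n : Nat), tags.length = n + k → " " ∉ tags →
    prepLoopA n tags = (keepB k tags).take n := by
  induction k with
  | zero =>
    intro tags n hlen _
    rw [prepLoopA, keepB_zero]
    simp [hlen, List.take_of_length_le]
  | succ k ih =>
    intro tags n hlen hsp
    rw [prepLoopA]
    have h1 : ¬ tags.length = n := by omega
    have h2 : n < tags.length := by omega
    simp only [h1, dite_false, h2, dite_true, hsp, dite_false]
    by_cases hemp : "" ∈ tags
    · simp only [hemp, dite_true]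
      rw [PySem.List.remove?_eq_some_erase tags "" hemp, Option.getD_some]
      rw [ih (tags.erase "") n (by have := List.length_erase_of_mem hemp; omega)
            (fun hm => hsp (List.mem_of_mem_erase hm))]
      rw [keepB_erase (k+1) tags (by omega) hemp]
      norm_num
    · simp only [hemp, dite_false]
      rw [PySem.List.slice_to_neg_one]
      have hsp' : " " ∉ tags.dropLast := fun hm => hsp (List.Sublist.mem hm (List.dropLast_sublist tags))
      have hemp' : "" ∉ tags.dropLast := fun hm => hemp (List.Sublist.mem hm (List.dropLast_sublist tags))
      rw [ih tags.dropLast n (by have : tags.dropLast.length = tags.length - 1 := List.length_dropLast; omega) hsp']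
      rw [keepB_not_mem _ _ hemp', keepB_not_mem _ _ hemp]
      rw [List.dropLast_eq_take, List.take_take]
      congr 1
      omega

-- … and equals B's replicate-padding when too short
theorem loopA_short (k : Nat) : ∀ (tags : List String) (n : Nat), tags ≠ [] → n = tags.length + k →
    prepLoopA n tags = tags ++ List.replicate k (PySem.List.pyGetD tags (-1) "") := by
  induction k with
  | zero =>
    intro tags n _ hlen
    have h : tags.length = n := by omega
    rw [prepLoopA]
    simp [h]
  | succ k ih =>
    intro tags n hne hlen
    rw [prepLoopA]
    have h1 : ¬ tags.length = n := by omega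
    have h2 : ¬ n < tags.length := by omega
    simp only [h1, dite_false, h2]
    rw [ih (tags ++ [PySem.List.pyGetD tags (-1) ""]) n (by simp) (by simp; omega)]
    rw [PySem.List.pyGetD_neg_one_append_singleton]
    rw [List.append_assoc]
    simp [List.replicate_succ]

-- scan and fill agree when ' ' does not occur
theorem scan_eq (l : List String) : ∀ init, " " ∉ l → scanA l init = scanB l init := by
  induction l with
  | nil => intro init _; rfl
  | cons t ts ih =>
    intro init h
    simp only [List.mem_cons, not_or] at h
    have ht' : t ≠ " " := fun e => h.1 e.symm
    simp only [scanA, scanB, List.foldl_cons]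
    have step : (if t ≠ "" ∧ t ≠ " " then t else init) = (if t ≠ "" then t else init) := by
      by_cases ht : t = "" <;> simp [ht, ht']
    rw [step]
    exact ih _ h.2

theorem fill_eq (l : List String) (last : String) (h : " " ∉ l) : fillA l last = fillB l last := by
  induction l generalizing last with
  | nil => rfl
  | cons t ts ih =>
    simp only [List.mem_cons, not_or] at h
    by_cases ht : t = "" <;> simp [fillA, fillB, ht, Ne.symm h.1, ih _ h.2]

-- the final scan/fill phase of the two ports agrees on any list not containing " "
theorem tail_eq (T : List String) (hsp : " " ∉ T) :
    fillA T (if PySem.List.pyGetD T 0 "" = "" ∨ PySem.List.pyGetD T 0 "" = " "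
             then scanA T (PySem.List.pyGetD T 0 "") else PySem.List.pyGetD T 0 "")
    = fillB T (if PySem.List.pyGetD T 0 "" = ""
               then scanB T (PySem.List.pyGetD T 0 "") else PySem.List.pyGetD T 0 "") := by
  have hf : PySem.List.pyGetD T 0 "" ≠ " " := by
    cases T with
    | nil => decide
    | cons t ts =>
      rw [PySem.List.pyGetD_zero_cons]
      intro e
      exact hsp (by simp [e])
  by_cases hf0 : PySem.List.pyGetD T 0 "" = ""
  · rw [if_pos (Or.inl hf0), if_pos hf0, scan_eq T _ hsp, fill_eq _ _ hsp]
  · rw [if_neg (by tauto), if_neg hf0, fill_eq _ _ hsp]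

-- ===== VERDICT (by name: the statement is the Claim_ definition above) =====
theorem prep_tags_spec : Claim_equal_prep_tags := by
  intro sc _ _
  unfold Spec_prep_tags prep_tags prep_tags_alt
  by_cases hb : PySem.Str.strip (PySem.List.pyGetD sc 0 "") = "" ∧
                PySem.Str.strip (PySem.List.pyGetD sc 1 "") = ""
  · simp only [if_pos hb]
  · simp only [if_neg hb]
    generalize hw : (PySem.Str.split? (PySem.Str.strip (PySem.List.pyGetD sc 0 "")) " ").getD [] = words
    generalize ht : (PySem.Str.split? (PySem.Str.strip (PySem.List.pyGetD sc 1 "")) " ").getD [] = tags0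
    have hne : tags0 ≠ [] := ht ▸ split_sp_ne_nil _
    have hsp : " " ∉ tags0 := ht ▸ split_sp_no_sp _
    simp only [Prod.mk.injEq, true_and]
    rcases Nat.lt_trichotomy words.length tags0.length with h | h | h
    · rw [loopA_long (tags0.length - words.length) tags0 words.length (by omega) hsp]
      rw [if_pos h]
      apply tail_eq
      intro hmem
      exact hsp (mem_keepB _ _ _ (List.mem_of_mem_take hmem))
    · rw [loopA_long 0 tags0 words.length (by omega) hsp, keepB_zero,
          List.take_of_length_le (le_of_eq h.symm)]
      rw [if_neg (show ¬ words.length < tags0.length by omega),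
          if_neg (show ¬ tags0.length < words.length by omega)]
      exact tail_eq tags0 hsp
    · rw [loopA_short (words.length - tags0.length) tags0 words.length hne (by omega)]
      rw [if_neg (show ¬ words.length < tags0.length by omega), if_pos h]
      apply tail_eq
      intro hmem
      rcases List.mem_append.mp hmem with hm | hm
      · exact hsp hm
      · have hL := List.eq_of_mem_replicate hm
        have hlen : 0 < tags0.length := List.length_pos_iff.mpr hne
        have hmemL : PySem.List.pyGetD tags0 (-1) "" ∈ tags0 :=
          PySem.List.pyGetD_mem tags0 ""
            (by constructor <;> [omega; omega] )
        exact hsp (hL ▸ hmemL)
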